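-- pv_equiv track=rewrite | github.com/AlainaMariaJoe/Coding-Practice | 045_Sort_String_Joswin.py | sort_and_rearrange_string
-- ===== SOURCE A (Python) =====
-- def sort_and_rearrange_string(s):
--     upper = ''
--     lower = ''
--     space = ''
--     other = ''
--     for i in sorted(s):
--         if i.isupper():
--             upper += i
--         elif i.islower():
--             lower += i
--         elif i == ' ':
--             space += i
--         else:
--             other += i
--     return upper + lower + other + space
-- ===== SOURCE B (Python) =====
-- def sort_and_rearrange_string(s):
--     # Counting sort over ASCII codes; emit categories upper, lower, other, space.
--     counts = [0] * 128
--     for ch in s: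
--         counts[ord(ch)] += 1
--     parts = []
--     for c in range(65, 91):                      # uppercase A-Z
--         parts.append(chr(c) * counts[c])
--     for c in range(97, 123):                     # lowercase a-z
--         parts.append(chr(c) * counts[c])
--     for c in range(128):                         # everything else except space
--         if not (65 <= c <= 90 or 97 <= c <= 122 or c == 32):
--             parts.append(chr(c) * counts[c])
--     parts.append(' ' * counts[32])
--     return ''.join(parts)
-- ===== Notes on version B (the rewrite author's own statement) =====
-- stated objective: faster
-- what changed: Replaces A's comparison sort (sorted(s)) followed by a per-character category partition with a single counting pass over a 128-slot ASCII table and a direct emission of each category's characters in code order.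
import Mathlib
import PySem

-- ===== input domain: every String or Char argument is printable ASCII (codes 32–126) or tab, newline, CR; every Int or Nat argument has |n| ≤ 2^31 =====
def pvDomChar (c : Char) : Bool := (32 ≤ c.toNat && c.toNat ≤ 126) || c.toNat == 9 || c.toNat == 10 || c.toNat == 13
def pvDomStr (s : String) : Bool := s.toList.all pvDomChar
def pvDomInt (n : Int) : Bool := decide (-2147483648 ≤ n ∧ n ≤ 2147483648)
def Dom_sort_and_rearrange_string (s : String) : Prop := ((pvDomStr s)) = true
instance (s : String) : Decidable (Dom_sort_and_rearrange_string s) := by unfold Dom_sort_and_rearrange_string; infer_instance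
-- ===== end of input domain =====

-- B replaces A's comparison sort + category partition by a counting sort over ASCII codes (same return value; A is O(n log n), B is O(n + 128)).

-- ===== PORT A =====
-- loop body of A's 'for i in sorted(s)': append i to the category accumulator (upper, lower, space, other)
def aStep (acc : List Char × List Char × List Char × List Char) (i : Char) :
    List Char × List Char × List Char × List Char :=
  if PySem.Chars.isupper i then (acc.1 ++ [i], acc.2.1, acc.2.2.1, acc.2.2.2)
  else if PySem.Chars.islower i then (acc.1, acc.2.1 ++ [i], acc.2.2.1, acc.2.2.2)
  else if i = ' ' then (acc.1, acc.2.1, acc.2.2.1 ++ [i], acc.2.2.2)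
  else (acc.1, acc.2.1, acc.2.2.1, acc.2.2.2 ++ [i])

def sort_and_rearrange_string (s : String) : String :=
  let r := (PySem.List.sorted s.toList (fun x => x) false).foldl aStep ([], [], [], [])
  String.mk (r.1 ++ r.2.1 ++ r.2.2.2 ++ r.2.2.1)   -- upper + lower + other + space

-- ===== PORT B =====
-- loop body of B's counting pass: counts[ord(ch)] += 1
def bBump (cnt : List Nat) (ch : Char) : List Nat :=
  cnt.set ch.toNat (cnt.getD ch.toNat 0 + 1)

-- chr(c) * counts[c]
def pvRep (counts : List Nat) (c : Nat) : List Char :=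
  List.replicate (counts.getD c 0) (Char.ofNat c)

-- the 'other' category: not an ASCII letter and not the space
def pvOtherCode (c : Nat) : Bool :=
  !(decide (65 ≤ c ∧ c ≤ 90) || decide (97 ≤ c ∧ c ≤ 122) || decide (c = 32))

def sort_and_rearrange_string_alt (s : String) : String :=
  let counts := s.toList.foldl bBump (List.replicate 128 0)
  let upper := (List.range' 65 26).flatMap (pvRep counts)
  let lower := (List.range' 97 26).flatMap (pvRep counts)
  let other := ((List.range 128).filter pvOtherCode).flatMap (pvRep counts)
  String.mk (upper ++ lower ++ other ++ List.replicate (counts.getD 32 0) ' ')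

-- ===== PRECONDITION & SPEC =====
def Spec_sort_and_rearrange_string (s : String) (out : String) : Prop := out = sort_and_rearrange_string_alt s
instance (s : String) (out : String) : Decidable (Spec_sort_and_rearrange_string s out) := by unfold Spec_sort_and_rearrange_string; infer_instance

-- ===== CLAIM (what is proved, stated in full; the proofs are below) =====
def Claim_equal_sort_and_rearrange_string : Prop := ∀ (s : String), Dom_sort_and_rearrange_string s → Spec_sort_and_rearrange_string s (sort_and_rearrange_string s)

-- ===== LEMMAS AND PROOFS =====

-- the four branch predicates of A's loop, in branch order
def pU (i : Char) : Bool := PySem.Chars.isupper i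
def pL (i : Char) : Bool := !PySem.Chars.isupper i && PySem.Chars.islower i
def pS (i : Char) : Bool := !PySem.Chars.isupper i && !PySem.Chars.islower i && decide (i = ' ')
def pO (i : Char) : Bool := !PySem.Chars.isupper i && !PySem.Chars.islower i && !decide (i = ' ')

lemma foldA (t : List Char) (u lo sp ot : List Char) :
    t.foldl aStep (u, lo, sp, ot) =
      (u ++ t.filter pU, lo ++ t.filter pL, sp ++ t.filter pS, ot ++ t.filter pO) := by
  induction t generalizing u lo sp ot with
  | nil => simp
  | cons c t ih =>
    simp only [List.foldl_cons, aStep, List.filter_cons, pU, pL, pS, pO]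
    by_cases h1 : PySem.Chars.isupper c = true
    · simp [h1, ih, List.append_assoc]
    · by_cases h2 : PySem.Chars.islower c = true
      · simp [h1, h2, ih, List.append_assoc]
      · by_cases h3 : c = ' '
        · have hu : PySem.Chars.isupper ' ' = false := by decide
          have hlo : PySem.Chars.islower ' ' = false := by decide
          subst h3
          simp [hu, hlo, ih, List.append_assoc]
        · simp [h1, h2, h3, ih, List.append_assoc]

-- Char code arithmetic
lemma toNat_ofNat_lt {c : Nat} (hc : c < 128) : (Char.ofNat c).toNat = c := by
  rw [Char.toNat_ofNat, if_pos (Or.inl (by omega))]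

lemma char_eq_iff_toNat {a : Char} {c : Nat} (hc : c < 128) :
    a = Char.ofNat c ↔ a.toNat = c := by
  constructor
  · rintro rfl; exact toNat_ofNat_lt hc
  · rintro rfl; exact (Char.ofNat_toNat a).symm

lemma ofNat_le_ofNat {c d : Nat} (hc : c < 128) (hd : d < 128) (h : c ≤ d) :
    Char.ofNat c ≤ Char.ofNat d := by
  rw [Char.le_def, UInt32.le_iff_toNat_le]
  show (Char.ofNat c).toNat ≤ (Char.ofNat d).toNat
  rw [toNat_ofNat_lt hc, toNat_ofNat_lt hd]; exact h

lemma isupper_iff (a : Char) : PySem.Chars.isupper a = true ↔ 65 ≤ a.toNat ∧ a.toNat ≤ 90 := by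
  simp [PySem.Chars.isupper, Char.le_def, UInt32.le_iff_toNat_le]

lemma islower_iff (a : Char) : PySem.Chars.islower a = true ↔ 97 ≤ a.toNat ∧ a.toNat ≤ 122 := by
  simp [PySem.Chars.islower, Char.le_def, UInt32.le_iff_toNat_le]

lemma space_iff (a : Char) : a = ' ' ↔ a.toNat = 32 := by
  rw [show (' ' : Char) = Char.ofNat 32 from rfl]
  exact char_eq_iff_toNat (by omega)

lemma isupper_false_iff (a : Char) :
    PySem.Chars.isupper a = false ↔ ¬(65 ≤ a.toNat ∧ a.toNat ≤ 90) := by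
  rw [← isupper_iff a]; simp

lemma islower_false_iff (a : Char) :
    PySem.Chars.islower a = false ↔ ¬(97 ≤ a.toNat ∧ a.toNat ≤ 122) := by
  rw [← islower_iff a]; simp

lemma pU_iff (a : Char) : pU a = true ↔ 65 ≤ a.toNat ∧ a.toNat ≤ 90 := by
  simp only [pU]; exact isupper_iff a

lemma pL_iff (a : Char) : pL a = true ↔ 97 ≤ a.toNat ∧ a.toNat ≤ 122 := by
  simp only [pL, Bool.and_eq_true, Bool.not_eq_true', isupper_false_iff, islower_iff]
  constructor
  · rintro ⟨-, h⟩; exact h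
  · intro h; exact ⟨by omega, h⟩

lemma pS_iff (a : Char) : pS a = true ↔ a.toNat = 32 := by
  simp only [pS, Bool.and_eq_true, Bool.not_eq_true', decide_eq_true_eq, space_iff,
    isupper_false_iff, islower_false_iff]
  constructor
  · rintro ⟨-, h⟩; exact h
  · intro h; exact ⟨⟨by omega, by omega⟩, h⟩

lemma pO_iff (a : Char) : pO a = true ↔
    ¬(65 ≤ a.toNat ∧ a.toNat ≤ 90) ∧ ¬(97 ≤ a.toNat ∧ a.toNat ≤ 122) ∧ a.toNat ≠ 32 := by
  simp only [pO, Bool.and_eq_true, Bool.not_eq_true', decide_eq_false_iff_not, space_iff,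
    isupper_false_iff, islower_false_iff]
  tauto

lemma pvOtherCode_iff (c : Nat) : pvOtherCode c = true ↔
    ¬(65 ≤ c ∧ c ≤ 90) ∧ ¬(97 ≤ c ∧ c ≤ 122) ∧ c ≠ 32 := by
  simp [pvOtherCode]; omega

-- counting pass: counts.getD c 0 counts occurrences of chr(c)
lemma counts_getD (l : List Char) (cnt : List Nat) (hlen : cnt.length = 128)
    {c : Nat} (hc : c < 128) :
    (l.foldl bBump cnt).getD c 0 = cnt.getD c 0 + l.count (Char.ofNat c) := by
  induction l generalizing cnt with
  | nil => simp
  | cons ch tl ih =>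
    simp only [List.foldl_cons, List.count_cons]
    rw [ih _ (by simp [bBump, hlen])]
    simp only [bBump, List.getD_eq_getElem?_getD, List.getElem?_set, hlen]
    by_cases h : ch.toNat = c
    · have : (ch == Char.ofNat c) = true := by
        simp [(char_eq_iff_toNat hc).2 h]
      simp [h, hc, this]; omega
    · have : (ch == Char.ofNat c) = false := by
        simp; intro he; exact h ((char_eq_iff_toNat hc).1 he)
      simp [h, this]

-- count of a char in a per-code replicate expansion
lemma count_flatMap_rep (f : Nat → Nat) (a : Char) :
    ∀ (cs : List Nat), cs.Nodup → (∀ c ∈ cs, c < 128) →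
    ((cs.flatMap (fun c => List.replicate (f c) (Char.ofNat c))).count a) =
      if a.toNat ∈ cs then f a.toNat else 0 := by
  intro cs
  induction cs with
  | nil => simp
  | cons c cs ih =>
    intro hnd hlt
    have hc : c < 128 := hlt c (by simp)
    simp only [List.flatMap_cons, List.count_append, List.count_replicate]
    rw [ih hnd.of_cons (fun d hd => hlt d (List.mem_cons_of_mem _ hd))]
    by_cases h : a.toNat = c
    · have ha : a = Char.ofNat c := (char_eq_iff_toNat hc).2 h
      have hnotin : a.toNat ∉ cs := by rw [h]; exact (List.nodup_cons.1 hnd).1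
      have e1 : (Char.ofNat c == a) = true := beq_iff_eq.2 ha.symm
      rw [e1, if_pos rfl, if_neg hnotin, if_pos (by simp [h]), h]
      omega
    · have e1 : (Char.ofNat c == a) = false := by
        simp only [beq_eq_false_iff_ne, ne_eq]
        intro he; exact h ((char_eq_iff_toNat hc).1 he.symm)
      have hmem : a.toNat ∈ c :: cs ↔ a.toNat ∈ cs := by simp [h]
      rw [e1, if_neg (by simp), Nat.zero_add, if_congr hmem rfl rfl]
  
-- sortedness of the per-code replicate expansion
lemma pairwise_flatMap_rep (f : Nat → Nat) :
    ∀ (cs : List Nat), cs.Pairwise (· < ·) → (∀ c ∈ cs, c < 128) →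
    (cs.flatMap (fun c => List.replicate (f c) (Char.ofNat c))).Pairwise (· ≤ ·) := by
  intro cs
  induction cs with
  | nil => simp
  | cons c cs ih =>
    intro hps hlt
    have hc : c < 128 := hlt c (by simp)
    simp only [List.flatMap_cons]
    rw [List.pairwise_append]
    refine ⟨List.pairwise_replicate.2 (Or.inr le_rfl),
      ih hps.of_cons (fun d hd => hlt d (List.mem_cons_of_mem _ hd)), ?_⟩
    intro x hx y hy
    obtain ⟨-, rfl⟩ := List.mem_replicate.1 hx
    obtain ⟨d, hd, hyrep⟩ := List.mem_flatMap.1 hy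
    obtain ⟨-, rfl⟩ := List.mem_replicate.1 hyrep
    exact ofNat_le_ofNat hc (hlt d (List.mem_cons_of_mem _ hd))
      (le_of_lt ((List.pairwise_cons.1 hps).1 d hd))

-- a category segment of B equals the corresponding filter of A's sorted list
lemma seg_eq (l : List Char) (cs : List Nat) (hps : cs.Pairwise (· < ·)) (hlt : ∀ c ∈ cs, c < 128)
    (p : Char → Bool) (hp : ∀ a ∈ l, (p a = true ↔ a.toNat ∈ cs)) :
    cs.flatMap (fun c => List.replicate (l.count (Char.ofNat c)) (Char.ofNat c)) =
      (PySem.List.sorted l (fun x => x) false).filter p := by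
  apply List.eq_of_perm_of_sorted (fun a b _ _ h1 h2 => le_antisymm h1 h2)
  · exact pairwise_flatMap_rep _ cs hps hlt
  · exact (PySem.List.sorted_pairwise l (fun x => x)).filter p
  · rw [List.perm_iff_count]
    intro a
    rw [count_flatMap_rep _ a cs (hps.nodup) hlt]
    have hcnt : (PySem.List.sorted l (fun x => x) false).count a = l.count a :=
      (PySem.List.sorted_perm l (fun x => x) false).count_eq a
    by_cases hal : a ∈ l
    · by_cases hpa : p a = true
      · rw [List.count_filter hpa, hcnt, if_pos ((hp a hal).1 hpa), Char.ofNat_toNat]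
      · have h0 : (List.filter p (PySem.List.sorted l (fun x => x) false)).count a = 0 := by
          rw [List.count_eq_zero]
          intro hmem
          exact hpa (List.of_mem_filter hmem)
        rw [h0, if_neg (fun hin => hpa ((hp a hal).2 hin))]
    · have h0 : l.count a = 0 := List.count_eq_zero.2 hal
      have h0' : (List.filter p (PySem.List.sorted l (fun x => x) false)).count a = 0 := by
        rw [List.count_eq_zero]
        intro hmem
        exact hal ((PySem.List.mem_sorted _ _ _ _).1 (List.mem_of_mem_filter hmem))
      rw [h0']
      split_ifs with hin
      · rw [Char.ofNat_toNat, h0]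
      · rfl

lemma flatMap_congr_mem {cs : List Nat} {f g : Nat → List Char}
    (h : ∀ c ∈ cs, f c = g c) : cs.flatMap f = cs.flatMap g := by
  induction cs with
  | nil => rfl
  | cons c cs ih =>
    simp only [List.flatMap_cons]
    rw [h c (by simp), ih (fun d hd => h d (List.mem_cons_of_mem _ hd))]

-- ===== VERDICT (by name: the statement is the Claim_ definition above) =====
theorem sort_and_rearrange_string_spec : Claim_equal_sort_and_rearrange_string := by
  intro s hdom
  unfold Spec_sort_and_rearrange_string sort_and_rearrange_string sort_and_rearrange_string_alt
  set l := s.toList with hl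
  have hdom' : ∀ a ∈ l, a.toNat < 128 := by
    intro a ha
    have := List.all_eq_true.1 hdom a ha
    simp only [pvDomChar, Bool.or_eq_true, Bool.and_eq_true, decide_eq_true_eq, beq_iff_eq] at this
    omega
  have hcnt : ∀ c : Nat, c < 128 →
      (l.foldl bBump (List.replicate 128 0)).getD c 0 = l.count (Char.ofNat c) := by
    intro c hc
    rw [counts_getD l _ (by simp) hc, List.getD_eq_getElem?_getD, List.getElem?_replicate]
    rw [if_pos hc]
    simp
  -- rewrite B's segments into replicate expansions of l.count
  have hrep : ∀ (cs : List Nat), (∀ c ∈ cs, c < 128) →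
      cs.flatMap (pvRep (l.foldl bBump (List.replicate 128 0))) =
        cs.flatMap (fun c => List.replicate (l.count (Char.ofNat c)) (Char.ofNat c)) := by
    intro cs hlt
    apply flatMap_congr_mem
    intro c hc
    simp only [pvRep, hcnt c (hlt c hc)]
  rw [foldA]
  simp only [List.nil_append]
  congr 1
  have hupper :
      (List.range' 65 26).flatMap (pvRep (l.foldl bBump (List.replicate 128 0))) =
        (PySem.List.sorted l (fun x => x) false).filter pU := by
    rw [hrep _ (by intro c hc; have := List.mem_range'_1.1 hc; omega)]
    apply seg_eq l _ (List.pairwise_lt_range' 1)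
      (by intro c hc; have := List.mem_range'_1.1 hc; omega)
    intro a _
    rw [List.mem_range'_1, pU_iff]
    omega
  have hlower :
      (List.range' 97 26).flatMap (pvRep (l.foldl bBump (List.replicate 128 0))) =
        (PySem.List.sorted l (fun x => x) false).filter pL := by
    rw [hrep _ (by intro c hc; have := List.mem_range'_1.1 hc; omega)]
    apply seg_eq l _ (List.pairwise_lt_range' 1)
      (by intro c hc; have := List.mem_range'_1.1 hc; omega)
    intro a _
    rw [List.mem_range'_1, pL_iff]
    omega
  have hother :
      ((List.range 128).filter pvOtherCode).flatMap (pvRep (l.foldl bBump (List.replicate 128 0))) =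
        (PySem.List.sorted l (fun x => x) false).filter pO := by
    rw [hrep _ (by intro c hc; have := List.mem_range.1 (List.mem_of_mem_filter hc); omega)]
    apply seg_eq l _ (List.pairwise_lt_range.filter _)
      (by intro c hc; have := List.mem_range.1 (List.mem_of_mem_filter hc); omega)
    intro a ha
    have hlt := hdom' a ha
    rw [List.mem_filter, List.mem_range, pO_iff]
    constructor
    · intro h
      exact ⟨hlt, (pvOtherCode_iff a.toNat).2 h⟩
    · rintro ⟨-, h⟩
      exact (pvOtherCode_iff a.toNat).1 h
  have hspace :
      List.replicate ((l.foldl bBump (List.replicate 128 0)).getD 32 0) ' ' =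
        (PySem.List.sorted l (fun x => x) false).filter pS := by
    have hsingle : ([32] : List Nat).flatMap
        (fun c => List.replicate (l.count (Char.ofNat c)) (Char.ofNat c)) =
        List.replicate (l.count (Char.ofNat 32)) (Char.ofNat 32) := by
      simp [List.flatMap_cons]
    rw [hcnt 32 (by omega), show (' ' : Char) = Char.ofNat 32 from rfl, ← hsingle]
    apply seg_eq l _ (by simp) (by simp)
    intro a _
    rw [List.mem_singleton, pS_iff]
  rw [hupper, hlower, hother, hspace]
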